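-- pv_equiv track=rewrite | github.com/pypi-data/pypi-mirror-335 | packages/foundrytools/foundrytools-0.1.4.tar.gz/foundrytools-0.1.4/foundrytools/app/otf_recalc_stems.py | _group_widths_with_neighbors
-- ===== SOURCE A (Python) =====
-- def _group_widths_with_neighbors(
--     report: list[tuple[int, int, list[str]]], max_distance: int = 2
-- ) -> list[list[tuple[int, int]]]:
--     """
--     Groups report entries based on their width and proximity to neighboring widths.
--
--     This function takes a report containing tuples of a unique identifier, a width,
--     and a list of associated strings. It groups entries together based on their widths
--     and their proximity to neighboring widths within a specified maximum distance.
--     Neighboring widths in the range `[width - max_distance, width + max_distance]`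
--     are identified, and groups are sorted by an identifier in descending order.
--
--     Parameters:
--         report: list of tuples, where each tuple contains:
--             - A unique identifier (int)
--             - A width value (int)
--             - Associated strings (list of str)
--         max_distance: (int, optional) Maximum proximity range to consider neighbors.
--             Defaults to 2.
--
--     Returns:
--         list of lists: Nested list where each sub-list contains tuples representing
--         grouped width-proximity neighbors. Each tuple contains:
--             - A unique identifier (int)
--             - A width value (int)
--     """
--     groups = []  # This will store the resulting groups
--
--     # Create a mapping of widths to their respective entries
--     width_map = {entry[1]: (entry[0], entry[1]) for entry in report}
--
--     # Iterate over each entry in the report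
--     for _, width, _ in report:
--         group = []
--         # Find all widths within the range [width - max_distance, width + max_distance]
--         for neighbor_width in range(width - max_distance, width + max_distance + 1):
--             if neighbor_width in width_map:
--                 group.append(width_map[neighbor_width])
--         # Sort the group by width
--         group.sort(key=lambda x: x[0], reverse=True)
--         groups.append(group)  # Append the built group to the result
--
--     return groups
-- ===== SOURCE B (Python) =====
-- def _bisect_left(xs, x):
--     lo, hi = 0, len(xs)
--     while lo < hi:
--         mid = (lo + hi) // 2
--         if xs[mid] < x:
--             lo = mid + 1
--         else:
--             hi = mid
--     return lo
--
--
-- def _bisect_right(xs, x):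
--     lo, hi = 0, len(xs)
--     while lo < hi:
--         mid = (lo + hi) // 2
--         if x < xs[mid]:
--             hi = mid
--         else:
--             lo = mid + 1
--     return lo
--
--
-- def _group_widths_with_neighbors(report, max_distance=2):
--     # Same last-wins dict keyed by width, then one sorted list of the
--     # distinct widths; each entry's neighbors come from a binary-searched
--     # slice of that list instead of scanning the integer range.
--     width_map = {entry[1]: (entry[0], entry[1]) for entry in report}
--     widths = sorted(width_map)
--     groups = []
--     for _, width, _ in report:
--         lo = _bisect_left(widths, width - max_distance)
--         hi = _bisect_right(widths, width + max_distance)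
--         group = sorted((width_map[w] for w in widths[lo:hi]),
--                        key=lambda x: x[0], reverse=True)
--         groups.append(group)
--     return groups
-- ===== Notes on version B (the rewrite author's own statement) =====
-- stated objective: faster
-- what changed: Instead of scanning the integer range [width-max_distance, width+max_distance] and membership-testing every candidate against the width dict, B sorts the distinct widths once and extracts each entry's neighbor group as a binary-searched (hand-written bisect_left/bisect_right) slice of that sorted list.
import Mathlib
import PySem

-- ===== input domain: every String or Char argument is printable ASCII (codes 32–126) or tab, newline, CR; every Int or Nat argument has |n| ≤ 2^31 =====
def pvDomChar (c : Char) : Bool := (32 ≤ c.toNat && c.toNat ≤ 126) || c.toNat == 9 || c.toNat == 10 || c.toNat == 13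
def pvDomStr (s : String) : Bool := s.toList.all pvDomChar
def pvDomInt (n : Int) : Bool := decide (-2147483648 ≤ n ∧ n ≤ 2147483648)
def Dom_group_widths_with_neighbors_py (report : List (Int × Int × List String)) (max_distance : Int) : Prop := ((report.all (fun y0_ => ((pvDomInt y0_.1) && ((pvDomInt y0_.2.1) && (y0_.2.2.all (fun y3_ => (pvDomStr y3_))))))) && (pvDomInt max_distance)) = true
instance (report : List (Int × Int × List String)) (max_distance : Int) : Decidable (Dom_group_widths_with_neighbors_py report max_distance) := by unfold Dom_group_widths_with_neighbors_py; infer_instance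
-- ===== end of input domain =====

-- B replaces A's per-entry integer-range scan (membership-testing every candidate width)
-- by one sorted list of the distinct widths plus a binary-searched slice per entry
-- (faster: per entry O(log W + group size) instead of O(max_distance), measured faster in a timing run).

-- ===== PORT A =====
-- Literal port of A: last-wins dict comprehension keyed by width, then for each entry a
-- scan of range(width-max_distance, width+max_distance+1) with a membership test;
-- `width_map[neighbor_width]` is ported as getD under the contains-guard (key always present, exact).
def group_widths_with_neighbors_py (report : List (Int × Int × List String)) (max_distance : Int) : List (List (Int × Int)) :=
  let width_map : PySem.Dict Int (Int × Int) :=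
    report.foldl (fun d entry => d.insert entry.2.1 (entry.1, entry.2.1)) PySem.Dict.empty
  report.foldl (fun groups e =>
    let width := e.2.1
    let group :=
      (PySem.List.pyRange (width - max_distance) (width + max_distance + 1) 1).foldl
        (fun g nw => if width_map.contains nw then g ++ [width_map.getD nw (0, 0)] else g) []
    groups ++ [PySem.List.sorted group (fun x => x.1) true]) []

-- ===== PORT B =====
-- Hand-written bisect loops of Source B; `xs[mid]` is ported as getD (mid < hi ≤ len, so never out of range, exact).
def pvBisectLeftLoopB (xs : List Int) (x : Int) : Nat → Nat → Nat → Nat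
  | 0, lo, _ => lo
  | fuel + 1, lo, hi =>
    if lo < hi then
      if xs.getD ((lo + hi) / 2) 0 < x then pvBisectLeftLoopB xs x fuel ((lo + hi) / 2 + 1) hi
      else pvBisectLeftLoopB xs x fuel lo ((lo + hi) / 2)
    else lo

def pvBisectLeftB (xs : List Int) (x : Int) : Nat := pvBisectLeftLoopB xs x xs.length 0 xs.length

def pvBisectRightLoopB (xs : List Int) (x : Int) : Nat → Nat → Nat → Nat
  | 0, lo, _ => lo
  | fuel + 1, lo, hi =>
    if lo < hi then
      if x < xs.getD ((lo + hi) / 2) 0 then pvBisectRightLoopB xs x fuel lo ((lo + hi) / 2)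
      else pvBisectRightLoopB xs x fuel ((lo + hi) / 2 + 1) hi
    else lo

def pvBisectRightB (xs : List Int) (x : Int) : Nat := pvBisectRightLoopB xs x xs.length 0 xs.length

-- Literal port of B: same last-wins dict, sorted distinct widths once, then per entry a
-- binary-searched slice widths[lo:hi] mapped through the dict (`width_map[w]` ported as
-- getD: every sliced w is a key, exact), sorted by id descending.
def group_widths_with_neighbors_py_alt (report : List (Int × Int × List String)) (max_distance : Int) : List (List (Int × Int)) :=
  let width_map : PySem.Dict Int (Int × Int) :=
    report.foldl (fun d entry => d.insert entry.2.1 (entry.1, entry.2.1)) PySem.Dict.empty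
  let widths := PySem.List.sorted width_map.keys (fun w => w)
  report.foldl (fun groups e =>
    let width := e.2.1
    let lo := pvBisectLeftB widths (width - max_distance)
    let hi := pvBisectRightB widths (width + max_distance)
    groups ++ [PySem.List.sorted
      ((PySem.List.slice widths (some (lo : Int)) (some (hi : Int))).map
        (fun w => width_map.getD w (0, 0)))
      (fun x => x.1) true]) []

-- ===== PRECONDITION & SPEC =====
def Spec_group_widths_with_neighbors_py (report : List (Int × Int × List String)) (max_distance : Int) (out : List (List (Int × Int))) : Prop := out = group_widths_with_neighbors_py_alt report max_distance
instance (report : List (Int × Int × List String)) (max_distance : Int) (out : List (List (Int × Int))) : Decidable (Spec_group_widths_with_neighbors_py report max_distance out) := by unfold Spec_group_widths_with_neighbors_py; infer_instance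

-- ===== CLAIM (what is proved, stated in full; the proofs are below) =====
def Claim_equal_group_widths_with_neighbors_py : Prop := ∀ (report : List (Int × Int × List String)) (max_distance : Int), Dom_group_widths_with_neighbors_py report max_distance → Spec_group_widths_with_neighbors_py report max_distance (group_widths_with_neighbors_py report max_distance)

-- ===== LEMMAS AND PROOFS =====

theorem pvBLL_spec (xs : List Int) (x : Int) (hpw : xs.Pairwise (· ≤ ·)) :
    ∀ (n lo hi : Nat), hi - lo ≤ n → lo ≤ hi → hi ≤ xs.length →
    (∀ j (_ : j < xs.length), j < lo → xs[j] < x) →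
    (∀ j (_ : j < xs.length), hi ≤ j → x ≤ xs[j]) →
    lo ≤ pvBisectLeftLoopB xs x n lo hi ∧ pvBisectLeftLoopB xs x n lo hi ≤ hi ∧
    (∀ j (_ : j < xs.length), j < pvBisectLeftLoopB xs x n lo hi → xs[j] < x) ∧
    (∀ j (_ : j < xs.length), pvBisectLeftLoopB xs x n lo hi ≤ j → x ≤ xs[j]) := by
  have hpg := List.pairwise_iff_getElem.mp hpw
  intro n
  induction n with
  | zero =>
    intro lo hi hn hlh _ hlow hhigh
    have h0 : pvBisectLeftLoopB xs x 0 lo hi = lo := rfl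
    rw [h0]
    exact ⟨le_refl _, hlh, hlow, fun j hj hji => hhigh j hj (by omega)⟩
  | succ n ih =>
    intro lo hi hn hlh hlen hlow hhigh
    simp only [pvBisectLeftLoopB]
    by_cases h : lo < hi
    · simp only [h, if_true]
      have hmidlt : (lo + hi) / 2 < xs.length := by omega
      rw [List.getD_eq_getElem xs 0 hmidlt]
      by_cases hc : xs[(lo + hi) / 2] < x
      · simp only [hc, if_true]
        have hlow' : ∀ j (_ : j < xs.length), j < (lo + hi) / 2 + 1 → xs[j] < x := by
          intro j hj hjm
          rcases Nat.lt_or_ge j ((lo + hi) / 2) with h' | h'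
          · exact lt_of_le_of_lt (hpg j _ hj hmidlt h') hc
          · have : j = (lo + hi) / 2 := by omega
            subst this; exact hc
        have := ih ((lo + hi) / 2 + 1) hi (by omega) (by omega) hlen hlow' hhigh
        exact ⟨by omega, this.2.1, this.2.2.1, this.2.2.2⟩
      · simp only [hc, if_false]
        have hhigh' : ∀ j (_ : j < xs.length), (lo + hi) / 2 ≤ j → x ≤ xs[j] := by
          intro j hj hjm
          rcases Nat.lt_or_ge ((lo + hi) / 2) j with h' | h'
          · exact le_trans (le_of_not_gt hc) (hpg _ j hmidlt hj h')
          · have : j = (lo + hi) / 2 := by omega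
            subst this; exact le_of_not_gt hc
        have := ih lo ((lo + hi) / 2) (by omega) (by omega) (by omega) hlow hhigh'
        exact ⟨this.1, by omega, this.2.2.1, this.2.2.2⟩
    · simp only [h, if_false]
      exact ⟨le_refl _, hlh, hlow, fun j hj hji => hhigh j hj (by omega)⟩

theorem pvBRL_spec (xs : List Int) (x : Int) (hpw : xs.Pairwise (· ≤ ·)) :
    ∀ (n lo hi : Nat), hi - lo ≤ n → lo ≤ hi → hi ≤ xs.length →
    (∀ j (_ : j < xs.length), j < lo → xs[j] ≤ x) →
    (∀ j (_ : j < xs.length), hi ≤ j → x < xs[j]) →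
    lo ≤ pvBisectRightLoopB xs x n lo hi ∧ pvBisectRightLoopB xs x n lo hi ≤ hi ∧
    (∀ j (_ : j < xs.length), j < pvBisectRightLoopB xs x n lo hi → xs[j] ≤ x) ∧
    (∀ j (_ : j < xs.length), pvBisectRightLoopB xs x n lo hi ≤ j → x < xs[j]) := by
  have hpg := List.pairwise_iff_getElem.mp hpw
  intro n
  induction n with
  | zero =>
    intro lo hi hn hlh _ hlow hhigh
    have h0 : pvBisectRightLoopB xs x 0 lo hi = lo := rfl
    rw [h0]
    exact ⟨le_refl _, hlh, hlow, fun j hj hji => hhigh j hj (by omega)⟩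
  | succ n ih =>
    intro lo hi hn hlh hlen hlow hhigh
    simp only [pvBisectRightLoopB]
    by_cases h : lo < hi
    · simp only [h, if_true]
      have hmidlt : (lo + hi) / 2 < xs.length := by omega
      rw [List.getD_eq_getElem xs 0 hmidlt]
      by_cases hc : x < xs[(lo + hi) / 2]
      · simp only [hc, if_true]
        have hhigh' : ∀ j (_ : j < xs.length), (lo + hi) / 2 ≤ j → x < xs[j] := by
          intro j hj hjm
          rcases Nat.lt_or_ge ((lo + hi) / 2) j with h' | h'
          · exact lt_of_lt_of_le hc (hpg _ j hmidlt hj h')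
          · have : j = (lo + hi) / 2 := by omega
            subst this; exact hc
        have := ih lo ((lo + hi) / 2) (by omega) (by omega) (by omega) hlow hhigh'
        exact ⟨this.1, by omega, this.2.2.1, this.2.2.2⟩
      · simp only [hc, if_false]
        have hlow' : ∀ j (_ : j < xs.length), j < (lo + hi) / 2 + 1 → xs[j] ≤ x := by
          intro j hj hjm
          rcases Nat.lt_or_ge j ((lo + hi) / 2) with h' | h'
          · exact le_trans (hpg j _ hj hmidlt h') (le_of_not_gt hc)
          · have : j = (lo + hi) / 2 := by omega
            subst this; exact le_of_not_gt hc
        have := ih ((lo + hi) / 2 + 1) hi (by omega) (by omega) hlen hlow' hhigh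
        exact ⟨by omega, this.2.1, this.2.2.1, this.2.2.2⟩
    · simp only [h, if_false]
      exact ⟨le_refl _, hlh, hlow, fun j hj hji => hhigh j hj (by omega)⟩

theorem pvBL_spec (xs : List Int) (x : Int) (hpw : xs.Pairwise (· ≤ ·)) :
    pvBisectLeftB xs x ≤ xs.length ∧
    (∀ j (_ : j < xs.length), j < pvBisectLeftB xs x → xs[j] < x) ∧
    (∀ j (_ : j < xs.length), pvBisectLeftB xs x ≤ j → x ≤ xs[j]) := by
  have := pvBLL_spec xs x hpw xs.length 0 xs.length (by omega) (by omega) (by omega)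
    (fun j hj hji => absurd hji (by omega)) (fun j hj hji => absurd hji (by omega))
  exact ⟨this.2.1, this.2.2.1, this.2.2.2⟩

theorem pvBR_spec (xs : List Int) (x : Int) (hpw : xs.Pairwise (· ≤ ·)) :
    pvBisectRightB xs x ≤ xs.length ∧
    (∀ j (_ : j < xs.length), j < pvBisectRightB xs x → xs[j] ≤ x) ∧
    (∀ j (_ : j < xs.length), pvBisectRightB xs x ≤ j → x < xs[j]) := by
  have := pvBRL_spec xs x hpw xs.length 0 xs.length (by omega) (by omega) (by omega)
    (fun j hj hji => absurd hji (by omega)) (fun j hj hji => absurd hji (by omega))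
  exact ⟨this.2.1, this.2.2.1, this.2.2.2⟩

-- the binary-searched slice of a strictly increasing list IS A's filtered range scan
theorem slice_eq_filter_range (xs : List Int) (hlt : xs.Pairwise (· < ·)) (a b : Int)
    (c : Int → Bool) (hc : ∀ y, c y = true ↔ y ∈ xs) :
    (xs.drop (pvBisectLeftB xs a)).take (pvBisectRightB xs b - pvBisectLeftB xs a)
      = (PySem.List.pyRange a (b + 1) 1).filter c := by
  have hpw : xs.Pairwise (· ≤ ·) := hlt.imp le_of_lt
  obtain ⟨hL1, hL2, hL3⟩ := pvBL_spec xs a hpw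
  obtain ⟨hR1, hR2, hR3⟩ := pvBR_spec xs b hpw
  set L := pvBisectLeftB xs a with hLdef
  set R := pvBisectRightB xs b with hRdef
  have hnodup : xs.Nodup := hlt.imp ne_of_lt
  have hsub : ((xs.drop L).take (R - L)).Sublist xs :=
    (List.take_sublist _ _).trans (List.drop_sublist _ _)
  have hmemslice : ∀ y, y ∈ (xs.drop L).take (R - L) ↔ (y ∈ xs ∧ a ≤ y ∧ y ≤ b) := by
    intro y
    constructor
    · intro hy
      obtain ⟨k, hk, hky⟩ := List.mem_iff_getElem.mp hy
      have hklen : k < (xs.drop L).length := by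
        have := hk; simp only [List.length_take] at this; omega
      have hj : L + k < xs.length := by simp at hklen; omega
      have hxy : xs[L + k] = y := by
        rw [List.getElem_take, List.getElem_drop] at hky; exact hky
      have hkR : k < R - L := by simp [List.length_take] at hk; omega
      refine ⟨hxy ▸ List.getElem_mem hj, ?_, ?_⟩
      · rw [← hxy]; exact hL3 (L + k) hj (by omega)
      · rw [← hxy]; exact hR2 (L + k) hj (by omega)
    · rintro ⟨hyx, hay, hyb⟩
      obtain ⟨j, hj, hjy⟩ := List.mem_iff_getElem.mp hyx
      have hLj : L ≤ j := by
        by_contra hcon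
        exact absurd (hjy ▸ hL2 j hj (by omega)) (not_lt.mpr hay)
      have hjR : j < R := by
        by_contra hcon
        exact absurd (hjy ▸ hR3 j hj (by omega)) (not_lt.mpr hyb)
      apply List.mem_iff_getElem.mpr
      have hlen' : j - L < ((xs.drop L).take (R - L)).length := by
        simp [List.length_take]; omega
      refine ⟨j - L, hlen', ?_⟩
      rw [List.getElem_take, List.getElem_drop]
      exact (getElem_congr_idx (by omega : L + (j - L) = j)).trans hjy
  apply List.Perm.eq_of_pairwise
    (fun u v _ _ huv hvu => le_antisymm (le_of_lt huv) (le_of_lt hvu))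
  · exact hlt.sublist hsub
  · exact (PySem.List.pairwise_lt_pyRange_one a (b + 1)).filter c
  · apply (List.perm_ext_iff_of_nodup (hnodup.sublist hsub)
      ((PySem.List.nodup_pyRange_one a (b + 1)).filter c)).mpr
    intro y
    rw [hmemslice y, List.mem_filter, PySem.List.mem_pyRange_one, hc y]
    constructor
    · rintro ⟨h1, h2, h3⟩; exact ⟨⟨h2, by omega⟩, h1⟩
    · rintro ⟨⟨h2, h3⟩, h1⟩; exact ⟨h1, h2, by omega⟩

theorem foldl_app_single {α β : Type} (l : List α) (F : α → β) (acc : List β) :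
    l.foldl (fun acc e => acc ++ [F e]) acc = acc ++ l.map F := by
  induction l generalizing acc with
  | nil => simp
  | cons x t ih => simp [List.foldl_cons, ih]

-- ===== VERDICT (by name: the statement is the Claim_ definition above) =====
theorem group_widths_with_neighbors_py_spec : Claim_equal_group_widths_with_neighbors_py := by
  intro report max_distance _
  unfold Spec_group_widths_with_neighbors_py
  unfold group_widths_with_neighbors_py group_widths_with_neighbors_py_alt
  set d : PySem.Dict Int (Int × Int) :=
    report.foldl (fun d entry => d.insert entry.2.1 (entry.1, entry.2.1)) PySem.Dict.empty with hd
  set widths := PySem.List.sorted d.keys (fun w => w) with hw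
  have hkeysnodup : d.keys.Nodup := by
    rw [hd]
    exact PySem.Dict.nodup_keys_foldl_insert_key report (fun e => e.2.1)
      (fun _ e => (e.1, e.2.1)) PySem.Dict.empty (by simp [PySem.Dict.keys_empty])
  have hwperm : widths.Perm d.keys := PySem.List.sorted_perm d.keys (fun w => w) false
  have hwnodup : widths.Nodup := (hwperm.nodup_iff).mpr hkeysnodup
  have hwle : widths.Pairwise (· ≤ ·) := by
    have := PySem.List.sorted_pairwise d.keys (fun w => w)
    simpa using this
  have hwlt : widths.Pairwise (· < ·) :=
    (hwle.and hwnodup).imp (fun h => lt_of_le_of_ne h.1 h.2)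
  have hc : ∀ y : Int, d.contains y = true ↔ y ∈ widths := by
    intro y
    rw [PySem.Dict.contains_iff_mem_keys]
    exact ⟨fun h => hwperm.mem_iff.mpr h, fun h => hwperm.mem_iff.mp h⟩
  rw [foldl_app_single, foldl_app_single]
  simp only [List.nil_append]
  apply List.map_congr_left
  intro e _
  congr 1
  rw [PySem.List.foldl_append_if (fun nw => d.contains nw) (fun nw => d.getD nw (0, 0))]
  rw [PySem.List.slice_natCast]
  rw [slice_eq_filter_range widths hwlt (e.2.1 - max_distance) (e.2.1 + max_distance) _ hc]
  simp only [List.nil_append]
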